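-- pv_equiv track=rewrite | github.com/radumir2/programare_seminar | probleme/pinochio/main.py | lungime_nas_pinochio
-- ===== SOURCE A (Python) =====
-- def lungime_nas_pinochio(lungime_initiala_nas, rata_crestere, numar_de_zile):
--     rezultat = lungime_initiala_nas
--
--     for zi in range(numar_de_zile):
--         zi_saptamana = (zi + 1) % 7
--         if zi_saptamana == 0:
--             zi_saptamana = 7
--
--         if zi_saptamana < 6:  # nu e weekend
--             rezultat = rezultat + rata_crestere
--         else:  # e in weekend
--             rezultat = rezultat - 1
--
--     return rezultat  # lungimea nasului lui Pinochio la sfarsit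
-- ===== SOURCE B (Python) =====
-- def lungime_nas_pinochio(lungime_initiala_nas, rata_crestere, numar_de_zile):
--     n = max(numar_de_zile, 0)
--     saptamani, rest = divmod(n, 7)
--     zile_lucratoare = 5 * saptamani + min(rest, 5)
--     zile_weekend = n - zile_lucratoare
--     return lungime_initiala_nas + rata_crestere * zile_lucratoare - zile_weekend
-- ===== Notes on version B (the rewrite author's own statement) =====
-- stated objective: faster
-- what changed: Replaced the day-by-day simulation loop with a closed form that counts weekdays/weekend days from numar_de_zile via divmod(n, 7).
import Mathlib
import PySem

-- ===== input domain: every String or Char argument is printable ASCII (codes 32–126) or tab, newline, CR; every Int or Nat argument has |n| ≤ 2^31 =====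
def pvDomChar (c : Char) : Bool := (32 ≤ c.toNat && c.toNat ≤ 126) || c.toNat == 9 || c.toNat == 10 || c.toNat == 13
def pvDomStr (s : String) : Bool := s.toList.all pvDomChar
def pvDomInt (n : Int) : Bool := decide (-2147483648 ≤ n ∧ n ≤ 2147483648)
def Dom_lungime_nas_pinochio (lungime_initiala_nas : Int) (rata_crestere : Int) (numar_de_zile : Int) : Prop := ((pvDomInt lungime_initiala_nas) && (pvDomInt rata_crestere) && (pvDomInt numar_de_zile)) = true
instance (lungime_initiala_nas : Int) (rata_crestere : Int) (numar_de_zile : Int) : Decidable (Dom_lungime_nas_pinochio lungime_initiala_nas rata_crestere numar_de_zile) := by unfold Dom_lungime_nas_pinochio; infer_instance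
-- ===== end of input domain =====

-- B replaces A's day-by-day loop with an O(1) closed form counting weekdays/weekend days via divmod(n, 7).

-- ===== PORT A =====
-- one iteration of A's loop body (zi is the loop variable)
def pinochioStepA (rata_crestere : Int) (rezultat : Int) (zi : Int) : Int :=
  let zi_saptamana := PySem.Int.mod (zi + 1) 7
  let zi_saptamana := if zi_saptamana = 0 then 7 else zi_saptamana
  if zi_saptamana < 6 then rezultat + rata_crestere else rezultat - 1

def lungime_nas_pinochio (lungime_initiala_nas : Int) (rata_crestere : Int) (numar_de_zile : Int) : Int :=
  (PySem.List.pyRange 0 numar_de_zile 1).foldl (pinochioStepA rata_crestere) lungime_initiala_nas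

-- ===== PORT B =====
def lungime_nas_pinochio_alt (lungime_initiala_nas : Int) (rata_crestere : Int) (numar_de_zile : Int) : Int :=
  let n := max numar_de_zile 0
  let saptamani := PySem.Int.floordiv n 7
  let rest := PySem.Int.mod n 7
  let zile_lucratoare := 5 * saptamani + min rest 5
  let zile_weekend := n - zile_lucratoare
  lungime_initiala_nas + rata_crestere * zile_lucratoare - zile_weekend

-- ===== PRECONDITION & SPEC =====
def Spec_lungime_nas_pinochio (lungime_initiala_nas : Int) (rata_crestere : Int) (numar_de_zile : Int) (out : Int) : Prop := out = lungime_nas_pinochio_alt lungime_initiala_nas rata_crestere numar_de_zile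
instance (lungime_initiala_nas : Int) (rata_crestere : Int) (numar_de_zile : Int) (out : Int) : Decidable (Spec_lungime_nas_pinochio lungime_initiala_nas rata_crestere numar_de_zile out) := by unfold Spec_lungime_nas_pinochio; infer_instance

-- ===== CLAIM (what is proved, stated in full; the proofs are below) =====
def Claim_equal_lungime_nas_pinochio : Prop := ∀ (lungime_initiala_nas : Int) (rata_crestere : Int) (numar_de_zile : Int), Dom_lungime_nas_pinochio lungime_initiala_nas rata_crestere numar_de_zile → Spec_lungime_nas_pinochio lungime_initiala_nas rata_crestere numar_de_zile (lungime_nas_pinochio lungime_initiala_nas rata_crestere numar_de_zile)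

-- ===== LEMMAS AND PROOFS =====

-- number of weekday steps among the first m days (m ≥ 0)
def pinochioW (m : Int) : Int := 5 * (m / 7) + min (m % 7) 5

lemma pinochio_loop_closed (l r : Int) (n : Nat) :
    (PySem.List.pyRange 0 (n : Int) 1).foldl (pinochioStepA r) l
      = l + r * pinochioW (n : Int) - ((n : Int) - pinochioW (n : Int)) := by
  induction n with
  | zero => simp [PySem.List.pyRange_one_eq_nil (le_refl 0), pinochioW]
  | succ k ih =>
      have h1 : ((k + 1 : Nat) : Int) = (k : Int) + 1 := by push_cast; ring
      rw [h1, PySem.List.pyRange_one_succ_right (by positivity), List.foldl_append, ih]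
      simp only [List.foldl_cons, List.foldl_nil, pinochioStepA]
      rw [PySem.Int.mod_eq_emod_of_pos (b := 7) (by norm_num)]
      by_cases hwd : (k : Int) % 7 < 5
      · have hc : ¬ (((k : Int) + 1) % 7 = 0) := by omega
        have hlt : ((k : Int) + 1) % 7 < 6 := by omega
        rw [if_neg hc, if_pos hlt]
        have hW : pinochioW ((k : Int) + 1) = pinochioW (k : Int) + 1 := by
          unfold pinochioW; omega
        rw [hW]; ring
      · have hW : pinochioW ((k : Int) + 1) = pinochioW (k : Int) := by
          unfold pinochioW; omega
        by_cases hc : ((k : Int) + 1) % 7 = 0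
        · rw [if_pos hc, if_neg (by norm_num)]
          rw [hW]; ring
        · rw [if_neg hc]
          rw [if_neg (by omega)]
          rw [hW]; ring

theorem lungime_nas_pinochio_spec_aux (l r n : Int) :
    lungime_nas_pinochio l r n = lungime_nas_pinochio_alt l r n := by
  unfold lungime_nas_pinochio lungime_nas_pinochio_alt
  by_cases hn : n ≤ 0
  · rw [PySem.List.pyRange_one_eq_nil hn]
    have hmax : max n 0 = 0 := by omega
    simp [hmax, PySem.Int.floordiv, PySem.Int.mod]
  · have hmax : max n 0 = n := by omega
    have hcast : ((n.toNat : Int)) = n := Int.toNat_of_nonneg (by omega)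
    rw [hmax, ← hcast, pinochio_loop_closed l r n.toNat]
    simp only [PySem.Int.floordiv_eq_ediv_of_pos (b := 7) (by norm_num),
        PySem.Int.mod_eq_emod_of_pos (b := 7) (by norm_num), pinochioW]

theorem lungime_nas_pinochio_spec : Claim_equal_lungime_nas_pinochio := by
  intro l r n _
  exact lungime_nas_pinochio_spec_aux l r n
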